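-- pv_equiv track=rewrite | github.com/shaii120/AOC-2023 | day 8/Assi2.py | find_loops_lenght
-- ===== SOURCE A (Python) =====
-- def find_loops_lenght(instructions, network: dict):
--     starting_points = [point for point in network.keys() if point[-1] == "A"]
--     length_list = []
--
--     for point in starting_points:
--         instructions_loops = 0
--         postion_at_start = {point: instructions_loops}
--         current = point
--
--         while postion_at_start[current] == instructions_loops:
--             for inst in instructions:
--                 if inst == "L":
--                     direction = 0
--                 else:
--                     direction = 1
--
--                 current = network[current][direction]
--
--             instructions_loops += 1
--             if current not in postion_at_start:
--                 postion_at_start[current] = instructions_loops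
--             else:
--                 length_list.append(instructions_loops - postion_at_start[current])
--     return length_list
-- ===== SOURCE B (Python) =====
-- def find_loops_lenght(instructions, network: dict):
--     def advance(cur):
--         for inst in instructions:
--             cur = network[cur][0 if inst == "L" else 1]
--         return cur
--
--     lengths = []
--     n = len(network)
--     for start in network:
--         if start[-1] != "A":
--             continue
--         cur = start
--         for _ in range(n):
--             cur = advance(cur)
--         lam = 1
--         probe = advance(cur)
--         while probe != cur:
--             probe = advance(probe)
--             lam += 1
--         lengths.append(lam)
--     return lengths
-- ===== Notes on version B (the rewrite author's own statement) =====
-- stated objective: alternative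
-- what changed: Replaced A's visited-dictionary first-repeat detection per start with a pointer-chasing scheme: advance len(network) blocks so the pointer is guaranteed to sit on the cycle, then walk block-by-block counting until it returns to that node; no dictionary of visit times is kept.
-- outside the precondition, e.g. on find_loops_lenght(['L'], {'AA': ['AA', 'AA'], 'BB': ['XX', 'XX']}): A returns [1], B returns [1]
import Mathlib
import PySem

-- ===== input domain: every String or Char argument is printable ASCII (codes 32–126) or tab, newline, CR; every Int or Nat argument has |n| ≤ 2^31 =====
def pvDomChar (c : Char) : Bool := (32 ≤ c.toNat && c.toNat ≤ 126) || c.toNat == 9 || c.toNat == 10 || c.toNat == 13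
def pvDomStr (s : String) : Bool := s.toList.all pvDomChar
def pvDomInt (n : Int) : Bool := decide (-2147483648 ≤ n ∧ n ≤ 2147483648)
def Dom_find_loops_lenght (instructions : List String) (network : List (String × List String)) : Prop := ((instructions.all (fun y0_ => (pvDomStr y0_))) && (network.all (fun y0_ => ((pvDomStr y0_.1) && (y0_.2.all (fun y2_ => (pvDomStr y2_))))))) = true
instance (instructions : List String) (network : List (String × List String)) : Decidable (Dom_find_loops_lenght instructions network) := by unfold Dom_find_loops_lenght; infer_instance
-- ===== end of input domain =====

-- B replaces A's visited-dict first-repeat detection by pointer chasing (advance len(network)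
-- blocks onto the cycle, then count blocks until return); same return value, alternative algorithm.

-- ===== PORT A =====
-- one pass of the full instruction string: A's inner `for inst in instructions` loop
def pvBlockA (instructions : List String) (network : List (String × List String)) (cur : String) : Option String :=
  instructions.foldl (fun c inst =>
    c.bind fun s =>
      let direction : Int := if inst == "L" then 0 else 1
      ((PySem.Dict.mk network).get? s).bind fun lst =>
        PySem.List.pyGet? lst direction) (some cur)

-- A's `while postion_at_start[current] == instructions_loops` loop; fuel-bounded (the Python
-- while loop; fuel network.length + 2 is proved sufficient under Pre_)
def pvLoopA (instructions : List String) (network : List (String × List String)) :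
    Nat → PySem.Dict String Int → String → Int → List Int → Option (List Int)
  | 0, _, _, _, _ => none
  | fuel + 1, pos, cur, loops, acc =>
    match pos.get? cur with
    | none => none        -- KeyError in the while condition
    | some v =>
      if v == loops then
        match pvBlockA instructions network cur with
        | none => none    -- KeyError / IndexError inside the block
        | some cur' =>
          let loops' := loops + 1
          if (PySem.Dict.contains pos cur') = false then
            pvLoopA instructions network fuel (pos.insert cur' loops') cur' loops' acc
          else
            pvLoopA instructions network fuel pos cur' loops' (acc ++ [loops' - pos.getD cur' 0])
      else some acc

-- body of A's `for point in starting_points` loop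
def pvAStep (instructions : List String) (network : List (String × List String))
    (acc : Option (List Int)) (point : String) : Option (List Int) :=
  acc.bind fun lengths =>
    pvLoopA instructions network (network.length + 2)
      (PySem.Dict.mk [(point, (0 : Int))]) point 0 lengths

def find_loops_lenght (instructions : List String) (network : List (String × List String)) : List Int :=
  let starting? : Option (List String) :=
    (PySem.Dict.mk network).keys.foldl (fun acc point =>
      acc.bind fun pts =>
        (PySem.Str.pyGet? point (-1)).map fun c =>
          if c == 'A' then pts ++ [point] else pts) (some [])
  (starting?.bind fun starting =>
    starting.foldl (pvAStep instructions network) (some [])).getD []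

-- ===== PORT B =====
-- Source B's `advance`: one pass of the whole instruction string
def pvAdvance (instructions : List String) (network : List (String × List String)) (cur : String) : Option String :=
  instructions.foldl (fun c inst =>
    c.bind fun s =>
      ((PySem.Dict.mk network).get? s).bind fun lst =>
        PySem.List.pyGet? lst (if inst == "L" then 0 else 1)) (some cur)

-- Source B's `while probe != cur` counting loop; fuel-bounded (fuel n + 1 is proved sufficient)
def pvLamLoopB (instructions : List String) (network : List (String × List String)) (target : String) :
    Nat → String → Int → Option Int
  | 0, _, _ => none
  | fuel + 1, probe, lam =>
    if probe == target then some lam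
    else (pvAdvance instructions network probe).bind fun p' =>
      pvLamLoopB instructions network target fuel p' (lam + 1)

-- body of Source B's `for start in network` loop
def pvBStep (instructions : List String) (network : List (String × List String))
    (acc : Option (List Int)) (entry : String × List String) : Option (List Int) :=
  acc.bind fun lengths =>
    (PySem.Str.pyGet? entry.1 (-1)).bind fun c =>
      if c != 'A' then some lengths
      else
        ((List.range network.length).foldl
            (fun cur? _ => cur?.bind (pvAdvance instructions network)) (some entry.1)).bind fun cur =>
          (pvAdvance instructions network cur).bind fun probe =>
            (pvLamLoopB instructions network cur (network.length + 1) probe 1).map fun lam =>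
              lengths ++ [lam]

def find_loops_lenght_alt (instructions : List String) (network : List (String × List String)) : List Int :=
  (network.foldl (pvBStep instructions network) (some [])).getD []

-- ===== PRECONDITION & SPEC =====
def pvKeys (network : List (String × List String)) : List String := network.map (·.1)

-- Pre_ excludes: duplicate keys (the assoc list's first-match lookup would diverge from the
-- Python dict's last-wins collapse), empty keys (point[-1] raises IndexError), and — when some
-- key ends in 'A' and instructions is nonempty — networks whose entries are not closed under
-- the used directions (A may raise KeyError/IndexError; closure of EVERY entry, even an
-- unreachable one, is required as the termination bound, a mild stated narrowing).
def Pre_find_loops_lenght (instructions : List String) (network : List (String × List String)) : Prop :=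
  (pvKeys network).Nodup ∧
  (∀ k ∈ pvKeys network, k.toList ≠ []) ∧
  ((∀ k ∈ pvKeys network, k.toList.getLast? ≠ some 'A') ∨ instructions = [] ∨
    (∀ p ∈ network,
      (instructions.any (fun s => s == "L") = true → 1 ≤ p.2.length ∧ p.2.getD 0 "" ∈ pvKeys network) ∧
      (instructions.any (fun s => s != "L") = true → 2 ≤ p.2.length ∧ p.2.getD 1 "" ∈ pvKeys network)))

instance (instructions : List String) (network : List (String × List String)) : Decidable (Pre_find_loops_lenght instructions network) := by
  unfold Pre_find_loops_lenght; infer_instance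

def pvWitness_find_loops_lenght : List String × (List (String × List String)) :=
  (["L", "R"], [("AA", ["BB", "BB"]), ("BB", ["BB", "AA"])])

def Spec_find_loops_lenght (instructions : List String) (network : List (String × List String)) (out : List Int) : Prop := out = find_loops_lenght_alt instructions network
instance (instructions : List String) (network : List (String × List String)) (out : List Int) : Decidable (Spec_find_loops_lenght instructions network out) := by unfold Spec_find_loops_lenght; infer_instance

-- ===== CLAIM (what is proved, stated in full; the proofs are below) =====
def Claim_equal_find_loops_lenght : Prop := ∀ (instructions : List String) (network : List (String × List String)), Dom_find_loops_lenght instructions network → Pre_find_loops_lenght instructions network → Spec_find_loops_lenght instructions network (find_loops_lenght instructions network)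

-- ===== LEMMAS AND PROOFS =====

-- proof-side notions ------------------------------------------------------

-- the total step function agreeing with one block pass on the keys
def pvG (instructions : List String) (network : List (String × List String)) (s : String) : String :=
  (pvBlockA instructions network s).getD s

-- the block-orbit of a start
def pvOrbit (instructions : List String) (network : List (String × List String)) (x0 : String) (i : Nat) : String :=
  (pvG instructions network)^[i] x0

def pvEndsA (k : String) : Bool := k.toList.getLast? == some 'A'

-- the contents of A's postion_at_start dict after k loop iterations
def pvPos (instructions : List String) (network : List (String × List String)) (x0 : String) (k : Nat) :
    PySem.Dict String Int :=
  PySem.Dict.mk ((List.range (k + 1)).map fun i => (pvOrbit instructions network x0 i, (i : Int)))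

-- every key advances, by a full block, to a key
def pvGood (instructions : List String) (network : List (String × List String)) : Prop :=
  ∀ k ∈ pvKeys network,
    pvBlockA instructions network k = some (pvG instructions network k) ∧
    pvG instructions network k ∈ pvKeys network

-- the joint conclusion for one start: both per-start bodies append the same length
def pvPerStartConcl (instructions : List String) (network : List (String × List String)) (x0 : String) : Prop :=
  ∃ lam : Int,
    (∀ acc, pvAStep instructions network (some acc) x0 = some (acc ++ [lam])) ∧
    (∀ e : String × List String, e.1 = x0 → ∀ l, pvBStep instructions network (some l) e = some (l ++ [lam]))

theorem pvAdvance_eq_block (instructions : List String) (network : List (String × List String)) (c : String) :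
    pvAdvance instructions network c = pvBlockA instructions network c := rfl


theorem pvPyGet0 (v : List String) (h : 1 ≤ v.length) : PySem.List.pyGet? v 0 = some (v.getD 0 "") := by
  rw [PySem.List.pyGet?_zero]
  cases v with
  | nil => simp at h
  | cons a t => simp

theorem pvPyGet1 (v : List String) (h : 2 ≤ v.length) : PySem.List.pyGet? v 1 = some (v.getD 1 "") := by
  match v, h with
  | a :: b :: t, _ => simp [PySem.List.pyGet?, PySem.List.pyIdx?]

theorem pvKeys_mk (network : List (String × List String)) :
    (PySem.Dict.mk network).keys = pvKeys network := rfl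

theorem pvGet?_network (network : List (String × List String)) (hnd : (pvKeys network).Nodup)
    (c : String) (hc : c ∈ pvKeys network) :
    ∃ pr ∈ network, pr.1 = c ∧ (PySem.Dict.mk network).get? c = some pr.2 := by
  obtain ⟨pr, hpr, hfst⟩ := List.mem_map.mp hc
  refine ⟨pr, hpr, hfst, ?_⟩
  apply PySem.Dict.get?_of_mem_items
  · show (c, pr.2) ∈ network
    rw [← hfst]
    simpa using hpr
  · exact hnd

theorem pvOrbit_succ (instructions : List String) (network : List (String × List String)) (x0 : String) (k : Nat) :
    pvOrbit instructions network x0 (k + 1) = pvG instructions network (pvOrbit instructions network x0 k) :=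
  Function.iterate_succ_apply' _ _ _

theorem pvOrbit_mem (instructions : List String) (network : List (String × List String)) (x0 : String)
    (hg : pvGood instructions network) (hx0 : x0 ∈ pvKeys network) :
    ∀ t, pvOrbit instructions network x0 t ∈ pvKeys network := by
  intro t; induction t with
  | zero => exact hx0
  | succ k ih => rw [pvOrbit_succ]; exact (hg _ ih).2

theorem pvOrbit_block (instructions : List String) (network : List (String × List String)) (x0 : String)
    (hg : pvGood instructions network) (hx0 : x0 ∈ pvKeys network) (t : Nat) :
    pvBlockA instructions network (pvOrbit instructions network x0 t) =
      some (pvOrbit instructions network x0 (t + 1)) := by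
  rw [pvOrbit_succ]; exact (hg _ (pvOrbit_mem instructions network x0 hg hx0 t)).1

theorem pvExists_repeat (instructions : List String) (network : List (String × List String)) (x0 : String)
    (hnd : (pvKeys network).Nodup) (hg : pvGood instructions network) (hx0 : x0 ∈ pvKeys network) :
    ∃ m, m ≤ network.length ∧ ∃ j, j < m ∧
      pvOrbit instructions network x0 j = pvOrbit instructions network x0 m := by
  classical
  have hcard : (pvKeys network).toFinset.card < (Finset.range (network.length + 1)).card := by
    rw [Finset.card_range, List.toFinset_card_of_nodup hnd]
    simp [pvKeys]
  obtain ⟨a, ha, b, hb, hab, heq⟩ :=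
    Finset.exists_ne_map_eq_of_card_lt_of_maps_to hcard
      (fun t _ => List.mem_toFinset.mpr (pvOrbit_mem instructions network x0 hg hx0 t))
  rcases Nat.lt_or_ge a b with h | h
  · exact ⟨b, Nat.lt_succ_iff.mp (Finset.mem_range.mp hb), a, h, heq⟩
  · have h' : b < a := by
      rcases Nat.lt_or_ge b a with h2 | h2
      · exact h2
      · omega
    exact ⟨a, Nat.lt_succ_iff.mp (Finset.mem_range.mp ha), b, h', heq.symm⟩


theorem pvPeriodic (instructions : List String) (network : List (String × List String)) (x0 : String)
    (m j : Nat) (hj : j < m)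
    (hSj : pvOrbit instructions network x0 j = pvOrbit instructions network x0 m) :
    ∀ i, j ≤ i → pvOrbit instructions network x0 (i + (m - j)) = pvOrbit instructions network x0 i := by
  intro i hi
  obtain ⟨d, rfl⟩ := Nat.exists_eq_add_of_le hi
  induction d with
  | zero =>
    rw [show j + 0 + (m - j) = m by omega, show j + 0 = j by omega]
    exact hSj.symm
  | succ d ih =>
    rw [show j + (d + 1) + (m - j) = (j + d + (m - j)) + 1 by omega,
        show j + (d + 1) = (j + d) + 1 by omega, pvOrbit_succ, pvOrbit_succ, ih (by omega)]


theorem pvReduce (instructions : List String) (network : List (String × List String)) (x0 : String)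
    (j p : Nat) (hp : 0 < p)
    (hper : ∀ i, j ≤ i → pvOrbit instructions network x0 (i + p) = pvOrbit instructions network x0 i) :
    ∀ i, j ≤ i → pvOrbit instructions network x0 i = pvOrbit instructions network x0 (j + (i - j) % p) := by
  intro i
  induction i using Nat.strong_induction_on with
  | _ i IH =>
    intro hi
    by_cases hlt : i < j + p
    · rw [Nat.mod_eq_of_lt (by omega), show j + (i - j) = i by omega]
    · have h3 : pvOrbit instructions network x0 i = pvOrbit instructions network x0 (i - p) := by
        have h4 := hper (i - p) (by omega)
        rw [show i - p + p = i by omega] at h4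
        exact h4
      rw [h3, IH (i - p) (by omega) (by omega)]
      congr 1
      rw [show i - p - j = i - j - p by omega]
      conv_rhs => rw [show i - j = (i - j - p) + p by omega]
      rw [Nat.add_mod_right]


theorem pvGet?_pos (instructions : List String) (network : List (String × List String)) (x0 : String)
    (m : Nat)
    (hinj : ∀ a b, a < m → b < m → pvOrbit instructions network x0 a = pvOrbit instructions network x0 b → a = b)
    (k : Nat) (hk : k < m) (i' : Nat) (hi' : i' ≤ k) :
    (pvPos instructions network x0 k).get? (pvOrbit instructions network x0 i') = some (i' : Int) := by
  apply PySem.Dict.get?_of_mem_items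
  · show (pvOrbit instructions network x0 i', (i' : Int)) ∈
      (List.range (k + 1)).map fun i => (pvOrbit instructions network x0 i, (i : Int))
    exact List.mem_map.mpr ⟨i', List.mem_range.mpr (by omega), rfl⟩
  · show (((List.range (k + 1)).map fun i => (pvOrbit instructions network x0 i, (i : Int))).map (·.1)).Nodup
    rw [List.map_map]
    refine List.Nodup.map_on ?_ (List.nodup_range)
    intro a haa b hbb hab
    exact hinj a b (by have := List.mem_range.mp haa; omega) (by have := List.mem_range.mp hbb; omega) hab


theorem pvNotMem_pos (instructions : List String) (network : List (String × List String)) (x0 : String)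
    (m : Nat)
    (hinj : ∀ a b, a < m → b < m → pvOrbit instructions network x0 a = pvOrbit instructions network x0 b → a = b)
    (k : Nat) (hk1 : k + 1 < m) :
    (pvPos instructions network x0 k).contains (pvOrbit instructions network x0 (k + 1)) = false := by
  rw [PySem.Dict.contains_eq_isSome_get?]
  have hnone : (pvPos instructions network x0 k).get? (pvOrbit instructions network x0 (k + 1)) = none := by
    rw [PySem.Dict.get?_eq_none_iff_not_mem_keys]
    intro hmem
    have hmem' : pvOrbit instructions network x0 (k + 1) ∈
        (List.range (k + 1)).map (pvOrbit instructions network x0) := by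
      have : (pvPos instructions network x0 k).keys =
          (List.range (k + 1)).map (pvOrbit instructions network x0) := by
        show (((List.range (k + 1)).map fun i => (pvOrbit instructions network x0 i, (i : Int))).map (·.1)) = _
        rw [List.map_map]
        rfl
      rwa [this] at hmem
    obtain ⟨i, hi, heq⟩ := List.mem_map.mp hmem'
    have := hinj i (k + 1) (by have := List.mem_range.mp hi; omega) hk1 heq
    have := List.mem_range.mp hi
    omega
  rw [hnone]
  rfl


theorem pvPos_insert (instructions : List String) (network : List (String × List String)) (x0 : String)
    (m : Nat)
    (hinj : ∀ a b, a < m → b < m → pvOrbit instructions network x0 a = pvOrbit instructions network x0 b → a = b)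
    (k : Nat) (hk1 : k + 1 < m) :
    (pvPos instructions network x0 k).insert (pvOrbit instructions network x0 (k + 1)) ((k : Int) + 1) =
      pvPos instructions network x0 (k + 1) := by
  apply PySem.Dict.ext
  rw [PySem.Dict.items_insert_of_not_contains _ _ (pvNotMem_pos instructions network x0 m hinj k hk1)]
  show ((List.range (k + 1)).map fun i => (pvOrbit instructions network x0 i, (i : Int))) ++
      [(pvOrbit instructions network x0 (k + 1), (k : Int) + 1)] =
    (List.range (k + 1 + 1)).map fun i => (pvOrbit instructions network x0 i, (i : Int))
  conv_rhs => rw [List.range_succ]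
  rw [List.map_append]
  simp


theorem pvLoopA_inv (instructions : List String) (network : List (String × List String)) (x0 : String)
    (hg : pvGood instructions network) (hx0 : x0 ∈ pvKeys network)
    (m j : Nat) (hj : j < m)
    (hSj : pvOrbit instructions network x0 j = pvOrbit instructions network x0 m)
    (hinj : ∀ a b, a < m → b < m → pvOrbit instructions network x0 a = pvOrbit instructions network x0 b → a = b) :
    ∀ fuel k acc, k < m → m - k + 1 ≤ fuel →
      pvLoopA instructions network fuel (pvPos instructions network x0 k)
        (pvOrbit instructions network x0 k) (k : Int) acc = some (acc ++ [((m - j : Nat) : Int)]) := by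
  intro fuel
  induction fuel with
  | zero => intro k acc hk hf; omega
  | succ f ih =>
    intro k acc hk hf
    have hget := pvGet?_pos instructions network x0 m hinj k hk k le_rfl
    simp only [pvLoopA, hget, beq_self_eq_true, if_true,
      pvOrbit_block instructions network x0 hg hx0 k]
    by_cases hkm : k + 1 = m
    · have hjk : j ≤ k := by omega
      have hgj := pvGet?_pos instructions network x0 m hinj k hk j hjk
      have hcur' : pvOrbit instructions network x0 (k + 1) = pvOrbit instructions network x0 j := by
        rw [hkm, ← hSj]
      rw [hcur']
      have hcont : (pvPos instructions network x0 k).contains (pvOrbit instructions network x0 j) = true := by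
        rw [PySem.Dict.contains_eq_isSome_get?, hgj]; rfl
      have hgd : (pvPos instructions network x0 k).getD (pvOrbit instructions network x0 j) 0 = (j : Int) := by
        rw [PySem.Dict.getD_eq_get?_getD, hgj]; rfl
      simp only [hcont, Bool.true_eq_false, if_false, hgd]
      have hval : (k : Int) + 1 - (j : Int) = ((m - j : Nat) : Int) := by omega
      rw [hval]
      obtain ⟨f', rfl⟩ : ∃ f', f = f' + 1 := ⟨f - 1, by omega⟩
      have hbne : ((j : Int) == (k : Int) + 1) = false := by
        refine beq_eq_false_iff_ne.mpr ?_
        intro hcontra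
        have : j = k + 1 := by exact_mod_cast hcontra
        omega
      simp only [pvLoopA, hgj, hbne, Bool.false_eq_true, if_false]
    · have hk1 : k + 1 < m := by omega
      have hcont := pvNotMem_pos instructions network x0 m hinj k hk1
      simp only [hcont, if_true]
      rw [pvPos_insert instructions network x0 m hinj k hk1,
          show (k : Int) + 1 = ((k + 1 : Nat) : Int) by omega]
      exact ih (k + 1) acc hk1 (by omega)


theorem pvRangeFold (instructions : List String) (network : List (String × List String)) (x0 : String)
    (hg : pvGood instructions network) (hx0 : x0 ∈ pvKeys network) :
    ∀ N, (List.range N).foldl (fun c? _ => c?.bind (pvAdvance instructions network)) (some x0) =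
      some (pvOrbit instructions network x0 N) := by
  intro N
  induction N with
  | zero => simp [pvOrbit]
  | succ N ih =>
    rw [List.range_succ, List.foldl_append, ih]
    simp only [List.foldl_cons, List.foldl_nil, Option.bind_some]
    exact pvOrbit_block instructions network x0 hg hx0 N


theorem pvLamLoopB_inv (instructions : List String) (network : List (String × List String)) (x0 : String)
    (hg : pvGood instructions network) (hx0 : x0 ∈ pvKeys network)
    (N p : Nat) (hp : 0 < p)
    (hret : pvOrbit instructions network x0 (N + p) = pvOrbit instructions network x0 N)
    (hne : ∀ t, 1 ≤ t → t < p → pvOrbit instructions network x0 (N + t) ≠ pvOrbit instructions network x0 N) :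
    ∀ fuel t, 1 ≤ t → t ≤ p → p - t + 1 ≤ fuel →
      pvLamLoopB instructions network (pvOrbit instructions network x0 N) fuel
        (pvOrbit instructions network x0 (N + t)) (t : Int) = some ((p : Nat) : Int) := by
  intro fuel
  induction fuel with
  | zero => intro t h1 h2 hf; omega
  | succ f ih =>
    intro t h1 h2 hf
    by_cases htp : t = p
    · subst htp
      simp only [pvLamLoopB, hret, beq_self_eq_true, if_true]
    · have hlt : t < p := by omega
      have hb : (pvOrbit instructions network x0 (N + t) == pvOrbit instructions network x0 N) = false :=
        beq_eq_false_iff_ne.mpr (hne t h1 hlt)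
      simp only [pvLamLoopB, hb, Bool.false_eq_true, if_false]
      rw [pvAdvance_eq_block, pvOrbit_block instructions network x0 hg hx0 (N + t)]
      simp only [Option.bind_some]
      rw [show N + t + 1 = N + (t + 1) by omega, show (t : Int) + 1 = ((t + 1 : Nat) : Int) by omega]
      exact ih (t + 1) (by omega) (by omega) (by omega)



theorem pvBlockA_closed (instructions : List String) (network : List (String × List String))
    (hnd : (pvKeys network).Nodup)
    (hcl : ∀ p ∈ network,
      (instructions.any (fun s => s == "L") = true → 1 ≤ p.2.length ∧ p.2.getD 0 "" ∈ pvKeys network) ∧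
      (instructions.any (fun s => s != "L") = true → 2 ≤ p.2.length ∧ p.2.getD 1 "" ∈ pvKeys network)) :
    ∀ insts : List String, (∀ s ∈ insts, s ∈ instructions) → ∀ c ∈ pvKeys network,
      ∃ c' ∈ pvKeys network,
        insts.foldl (fun c inst =>
          c.bind fun s =>
            let direction : Int := if inst == "L" then 0 else 1
            ((PySem.Dict.mk network).get? s).bind fun lst =>
              PySem.List.pyGet? lst direction) (some c) = some c' := by
  intro insts
  induction insts with
  | nil => exact fun _ c hc => ⟨c, hc, rfl⟩
  | cons a t ih =>
    intro hsub c hc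
    obtain ⟨pr, hpr, hfst, hget⟩ := pvGet?_network network hnd c hc
    simp only [List.foldl_cons, Option.bind_some]
    by_cases haL : (a == "L") = true
    · have hany : instructions.any (fun s => s == "L") = true :=
        List.any_eq_true.mpr ⟨a, hsub a (by simp), haL⟩
      obtain ⟨hlen, hmem⟩ := (hcl pr hpr).1 hany
      have hpg := pvPyGet0 pr.2 hlen
      simp only [haL, if_true, hget, Option.bind_some, hpg]
      exact ih (fun s hs => hsub s (by simp [hs])) _ hmem
    · have hany : instructions.any (fun s => s != "L") = true :=
        List.any_eq_true.mpr ⟨a, hsub a (by simp), by simp_all⟩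
      obtain ⟨hlen, hmem⟩ := (hcl pr hpr).2 hany
      have hpg := pvPyGet1 pr.2 hlen
      have haL' : (a == "L") = false := by simp_all
      simp only [haL', Bool.false_eq_true, if_false, hget, Option.bind_some, hpg]
      exact ih (fun s hs => hsub s (by simp [hs])) _ hmem

theorem pvPerStart (instructions : List String) (network : List (String × List String)) (x0 : String)
    (hnd : (pvKeys network).Nodup) (hg : pvGood instructions network) (hx0 : x0 ∈ pvKeys network)
    (_hx0ne : x0.toList ≠ []) (hA : pvEndsA x0 = true) :
    pvPerStartConcl instructions network x0 := by
  classical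
  obtain ⟨m0, hm0, j0, hj0, hrep0⟩ := pvExists_repeat instructions network x0 hnd hg hx0
  have hPex : ∃ m, ∃ jj, jj < m ∧
      pvOrbit instructions network x0 jj = pvOrbit instructions network x0 m := ⟨m0, j0, hj0, hrep0⟩
  obtain ⟨j, hj, hSj⟩ := Nat.find_spec hPex
  set m := Nat.find hPex with hm
  have hmin : ∀ i, i < m → ¬ ∃ jj, jj < i ∧
      pvOrbit instructions network x0 jj = pvOrbit instructions network x0 i :=
    fun i hi => Nat.find_min hPex hi
  have hinj : ∀ a b, a < m → b < m →
      pvOrbit instructions network x0 a = pvOrbit instructions network x0 b → a = b := by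
    intro a b ha hb heq
    rcases lt_trichotomy a b with h | h | h
    · exact absurd ⟨a, h, heq⟩ (hmin b hb)
    · exact h
    · exact absurd ⟨b, h, heq.symm⟩ (hmin a ha)
  have hm_le : m ≤ network.length := le_trans (Nat.find_le ⟨j0, hj0, hrep0⟩) hm0
  set p := m - j with hpdef
  have hp : 0 < p := by omega
  have hper := pvPeriodic instructions network x0 m j hj hSj
  have hred := pvReduce instructions network x0 j p hp hper
  set N := network.length with hN
  have hjN : j ≤ N := by omega
  have hne2 : ∀ t, 1 ≤ t → t < p →
      pvOrbit instructions network x0 (N + t) ≠ pvOrbit instructions network x0 N := by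
    intro t h1 h2 heq
    have e1 := hred (N + t) (by omega)
    have e2 := hred N hjN
    have hxx : N + t - j = (N - j) + t := by omega
    rw [hxx] at e1
    have hmlt1 : ((N - j) + t) % p < p := Nat.mod_lt _ hp
    have hmlt2 : (N - j) % p < p := Nat.mod_lt _ hp
    have hix := hinj (j + ((N - j) + t) % p) (j + (N - j) % p) (by omega) (by omega)
      (by rw [← e1, ← e2]; exact heq)
    have hmm : ((N - j) + t) % p = (N - j) % p := by omega
    have h5 : (N - j) + t ≡ (N - j) + 0 [MOD p] := by
      simpa [Nat.ModEq, Nat.add_zero] using hmm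
    have h6 : t ≡ 0 [MOD p] := Nat.ModEq.add_left_cancel' (N - j) h5
    have h7 : t % p = 0 := by simpa [Nat.ModEq, Nat.mod_self] using h6
    rw [Nat.mod_eq_of_lt h2] at h7
    omega
  have hret : pvOrbit instructions network x0 (N + p) = pvOrbit instructions network x0 N :=
    hper N (by omega)
  refine ⟨((p : Nat) : Int), ?_, ?_⟩
  · intro acc
    unfold pvAStep
    simp only [Option.bind_some]
    have h0 : PySem.Dict.mk [(x0, (0 : Int))] = pvPos instructions network x0 0 := by
      apply PySem.Dict.ext
      show [(x0, (0 : Int))] = (List.range 1).map fun i => (pvOrbit instructions network x0 i, (i : Int))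
      simp [pvOrbit]
    rw [h0]
    have hloop := pvLoopA_inv instructions network x0 hg hx0 m j hj hSj hinj
      (network.length + 2) 0 acc (by omega) (by omega)
    simpa [pvOrbit] using hloop
  · intro e he l
    unfold pvBStep
    rw [he]
    have hlast : x0.toList.getLast? = some 'A' := by
      have := hA
      simpa [pvEndsA] using this
    have hpg : PySem.Str.pyGet? x0 (-1) = some 'A' := by
      simp [PySem.Str.pyGet?, PySem.List.pyGet?_neg_one, hlast]
    simp only [Option.bind_some, hpg, bne_self_eq_false, Bool.false_eq_true, if_false]
    rw [pvRangeFold instructions network x0 hg hx0 network.length]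
    simp only [Option.bind_some]
    rw [pvAdvance_eq_block, pvOrbit_block instructions network x0 hg hx0 network.length]
    simp only [Option.bind_some]
    have hlam := pvLamLoopB_inv instructions network x0 hg hx0 N p hp hret hne2
      (network.length + 1) 1 le_rfl (by omega) (by omega)
    rw [show ((1 : Nat) : Int) = 1 by simp] at hlam
    rw [show network.length + 1 = N + 1 by rw [hN]] at hlam
    rw [hlam]
    simp

theorem pvStartingFold (ksl : List String) (hne : ∀ k ∈ ksl, k.toList ≠ []) :
    ∀ pts, ksl.foldl (fun acc point =>
        acc.bind fun pts =>
          (PySem.Str.pyGet? point (-1)).map fun c =>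
            if c == 'A' then pts ++ [point] else pts) (some pts)
      = some (pts ++ ksl.filter pvEndsA) := by
  induction ksl with
  | nil => intro pts; simp
  | cons k t ih =>
    intro pts
    have hk := hne k (by simp)
    obtain ⟨c, hc⟩ := Option.isSome_iff_exists.mp (List.getLast?_isSome.mpr hk)
    have hpg : PySem.Str.pyGet? k (-1) = some c := by
      simp [PySem.Str.pyGet?, PySem.List.pyGet?_neg_one, hc]
    simp only [List.foldl_cons, Option.bind_some, hpg, Option.map_some]
    by_cases hcA : c = 'A'
    · subst hcA
      simp only [beq_self_eq_true, if_true]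
      rw [ih (fun k' hk' => hne k' (by simp [hk'])) (pts ++ [k])]
      have hfA : pvEndsA k = true := by simp [pvEndsA, hc]
      rw [List.filter_cons_of_pos hfA, List.append_assoc]
      rfl
    · have hcb : (c == 'A') = false := beq_eq_false_iff_ne.mpr hcA
      simp only [hcb, Bool.false_eq_true, if_false]
      rw [ih (fun k' hk' => hne k' (by simp [hk'])) pts]
      have hfA : pvEndsA k = false := by simp [pvEndsA, hc, hcA]
      rw [List.filter_cons_of_neg (by simp [hfA])]


theorem pvOuter (instructions : List String) (network : List (String × List String))
    (hne : ∀ k ∈ pvKeys network, k.toList ≠ [])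
    (hper : ∀ x0 ∈ pvKeys network, pvEndsA x0 = true → pvPerStartConcl instructions network x0) :
    ∀ entries : List (String × List String), (∀ e ∈ entries, e ∈ network) → ∀ l : List Int,
      entries.foldl (pvBStep instructions network) (some l) =
        ((entries.map (·.1)).filter pvEndsA).foldl (pvAStep instructions network) (some l) := by
  intro entries
  induction entries with
  | nil => intro _ l; simp
  | cons e t ih =>
    intro hsub l
    have he1 : e.1 ∈ pvKeys network := List.mem_map.mpr ⟨e, hsub e (by simp), rfl⟩
    simp only [List.foldl_cons, List.map_cons]
    by_cases hA : pvEndsA e.1 = true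
    · obtain ⟨lam, hAconc, hBconc⟩ := hper e.1 he1 hA
      rw [hBconc e rfl l, List.filter_cons_of_pos hA, List.foldl_cons, hAconc l]
      exact ih (fun e' he' => hsub e' (by simp [he'])) (l ++ [lam])
    · have hk := hne e.1 he1
      obtain ⟨c, hc⟩ := Option.isSome_iff_exists.mp (List.getLast?_isSome.mpr hk)
      have hcA : c ≠ 'A' := by
        intro hcontra
        subst hcontra
        exact hA (by simp [pvEndsA, hc])
      have hpg : PySem.Str.pyGet? e.1 (-1) = some c := by
        simp [PySem.Str.pyGet?, PySem.List.pyGet?_neg_one, hc]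
      have hskip : pvBStep instructions network (some l) e = some l := by
        unfold pvBStep
        have hpg' : PySem.List.pyGet? e.1.toList (-1) = some c := by
          rw [PySem.List.pyGet?_neg_one]; exact hc
        simp [hpg', hcA]
      rw [hskip, List.filter_cons_of_neg (by simp_all)]
      exact ih (fun e' he' => hsub e' (by simp [he'])) l


-- ===== VERDICT (by name: the statement is the Claim_ definition above) =====
theorem find_loops_lenght_spec : Claim_equal_find_loops_lenght := by
  intro instructions network _hdom hpre
  obtain ⟨hnd, hne, hdisj⟩ := hpre
  have hper : ∀ x0 ∈ pvKeys network, pvEndsA x0 = true →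
      pvPerStartConcl instructions network x0 := by
    intro x0 hx0 hA
    have hg : pvGood instructions network := by
      rcases hdisj with hnoA | hnil | hcl
      · exact absurd (by simpa [pvEndsA] using hA) (hnoA x0 hx0)
      · subst hnil
        exact fun k hk => ⟨rfl, hk⟩
      · intro k hk
        obtain ⟨c', hmem, hc'⟩ := pvBlockA_closed instructions network hnd hcl
          instructions (fun s hs => hs) k hk
        have hb : pvBlockA instructions network k = some c' := hc'
        have hgk : pvG instructions network k = c' := by simp [pvG, hb]
        exact ⟨by rw [hgk]; exact hb, by rw [hgk]; exact hmem⟩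
    exact pvPerStart instructions network x0 hnd hg hx0 (hne x0 hx0) hA
  show find_loops_lenght instructions network = find_loops_lenght_alt instructions network
  unfold find_loops_lenght find_loops_lenght_alt
  rw [pvKeys_mk, pvStartingFold (pvKeys network) hne [],
    pvOuter instructions network hne hper network (fun e he => he) []]
  simp only [Option.bind_some, List.nil_append]
  rfl
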